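-- pv_equiv track=rewrite | github.com/SoobinJung1013/Coding_Test_Study | yoojinYang/BaekJoon/1/8958.py | countfunc
-- ===== SOURCE A (Python) =====
-- def countfunc(s):
--   count=0
--   result=0
--
--   for i in s:
--     if(i=='O'):
--       count+=1
--       result+=count
--     else:
--       count=0
--   return result
-- ===== SOURCE B (Python) =====
-- def countfunc(s):
--     total = 0
--     i = 0
--     n = len(s)
--     while i < n:
--         if s[i] == 'O':
--             j = i
--             while j < n and s[j] == 'O':
--                 j += 1
--             L = j - i
--             total += L * (L + 1) // 2
--             i = j
--         else:
--             i += 1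
--     return total
-- ===== Notes on version B (the rewrite author's own statement) =====
-- stated objective: alternative
-- what changed: Instead of A's per-character running counter added into the result, B scans for maximal runs of 'O' and adds the closed-form triangular number L*(L+1)//2 per run.
import Mathlib
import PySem

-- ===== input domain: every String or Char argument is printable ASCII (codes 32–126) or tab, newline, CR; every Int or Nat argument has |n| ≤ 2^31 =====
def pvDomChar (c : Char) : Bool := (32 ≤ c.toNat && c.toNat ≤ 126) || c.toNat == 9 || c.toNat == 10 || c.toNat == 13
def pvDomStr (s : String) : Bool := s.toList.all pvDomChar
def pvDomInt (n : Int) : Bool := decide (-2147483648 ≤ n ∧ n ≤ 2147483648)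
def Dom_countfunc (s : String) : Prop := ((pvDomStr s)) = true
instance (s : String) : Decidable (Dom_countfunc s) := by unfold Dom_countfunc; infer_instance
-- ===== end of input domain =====

-- B replaces A's per-character running counter with a scan over maximal 'O' runs,
-- adding the closed-form triangular number L*(L+1)//2 per run (objective: alternative).

-- ===== PORT A =====
-- A's for-loop over the characters with state (count, result).
def pvLoopA (count result : Int) : List Char → Int
  | [] => result
  | c :: t => if c = 'O' then pvLoopA (count + 1) (result + (count + 1)) t
              else pvLoopA 0 result t

def countfunc (s : String) : Int := pvLoopA 0 0 s.toList

-- ===== PORT B =====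
-- Source B's inner while loop: length of the leading run of 'O'.
def pvLeadO : List Char → Nat
  | [] => 0
  | c :: t => if c = 'O' then pvLeadO t + 1 else 0

-- Source B's `i = j`: the list after the leading run of 'O'.
def pvAfterO : List Char → List Char
  | [] => []
  | c :: t => if c = 'O' then pvAfterO t else c :: t

theorem pvAfterO_length_le (l : List Char) : (pvAfterO l).length ≤ l.length := by
  induction l with
  | nil => simp [pvAfterO]
  | cons c t ih => by_cases h : c = 'O' <;> simp [pvAfterO, h]; omega


-- Source B's outer while loop: at an 'O', measure the run, add L*(L+1)//2, jump past it.
def pvGoB : List Char → Int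
  | [] => 0
  | c :: t =>
    if c = 'O' then
      let L : Nat := pvLeadO t + 1
      PySem.Int.floordiv ((L : Int) * ((L : Int) + 1)) 2 + pvGoB (pvAfterO t)
    else pvGoB t
termination_by l => l.length
decreasing_by
  · exact Nat.lt_succ_of_le (pvAfterO_length_le t)
  · simp

def countfunc_alt (s : String) : Int := pvGoB s.toList

-- ===== PRECONDITION & SPEC =====
def Spec_countfunc (s : String) (out : Int) : Prop := out = countfunc_alt s
instance (s : String) (out : Int) : Decidable (Spec_countfunc s out) := by unfold Spec_countfunc; infer_instance

-- ===== CLAIM (what is proved, stated in full; the proofs are below) =====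
def Claim_equal_countfunc : Prop := ∀ (s : String), Dom_countfunc s → Spec_countfunc s (countfunc s)

-- ===== LEMMAS AND PROOFS =====

-- sum (c+1) + (c+2) + … + (c+k): what A's counter contributes over a run of k 'O's starting at count c
def pvTriC (c : Int) : Nat → Int
  | 0 => 0
  | k + 1 => (c + 1) + pvTriC (c + 1) k

theorem pvTriC_succ (c : Int) (k : Nat) :
    pvTriC c (k + 1) = pvTriC c k + (c + (k + 1)) := by
  induction k generalizing c with
  | zero => simp [pvTriC]
  | succ k ih =>
    show (c + 1) + pvTriC (c + 1) (k + 1) = ((c + 1) + pvTriC (c + 1) k) + (c + (↑k + 1 + 1))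
    rw [ih]
    ring

theorem pvTriC_zero_eq (k : Nat) :
    pvTriC 0 k = PySem.Int.floordiv ((k : Int) * ((k : Int) + 1)) 2 := by
  induction k with
  | zero => simp [pvTriC, PySem.Int.floordiv]
  | succ k ih =>
    rw [pvTriC_succ, ih]
    have h1 : ((k : Int) * ((k : Int) + 1)) = ((k * (k + 1) : Nat) : Int) := by push_cast; ring
    have h2 : (((k+1) : Nat) : Int) * ((((k+1) : Nat) : Int) + 1) = (((k+1) * (k+2) : Nat) : Int) := by
      push_cast; ring
    rw [h1, h2]
    rw [show ((2:Int)) = ((2:Nat):Int) from rfl, PySem.Int.floordiv_natCast, PySem.Int.floordiv_natCast]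
    have he : ∃ m, k * (k + 1) = m + m := by
      rcases Nat.even_mul_succ_self k with ⟨m, hm⟩
      exact ⟨m, hm⟩
    rcases he with ⟨m, hm⟩
    have hp : (k+1) * (k+2) = k * (k+1) + 2 * (k+1) := by ring
    have : (k * (k + 1)) / 2 = m := by omega
    have : ((k+1) * (k+2)) / 2 = m + (k + 1) := by omega
    omega

theorem pvGoB_lead (t : List Char) :
    pvGoB t = pvTriC 0 (pvLeadO t) + pvGoB (pvAfterO t) := by
  cases t with
  | nil => simp [pvGoB, pvLeadO, pvAfterO, pvTriC]
  | cons c t =>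
    by_cases h : c = 'O'
    · simp only [pvGoB, pvLeadO, pvAfterO, h, if_pos]
      rw [pvTriC_zero_eq]
    · simp [pvGoB, pvLeadO, pvAfterO, h, pvTriC]

theorem pvLoopA_eq (l : List Char) : ∀ (c r : Int),
    pvLoopA c r l = r + pvTriC c (pvLeadO l) + pvGoB (pvAfterO l) := by
  induction l with
  | nil => intro c r; simp [pvLoopA, pvLeadO, pvAfterO, pvTriC, pvGoB]
  | cons x t ih =>
    intro c r
    by_cases h : x = 'O'
    · simp only [pvLoopA, pvLeadO, pvAfterO, h, if_pos]
      rw [ih]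
      show r + (c + 1) + pvTriC (c + 1) (pvLeadO t) + pvGoB (pvAfterO t) =
        r + ((c + 1) + pvTriC (c + 1) (pvLeadO t)) + pvGoB (pvAfterO t)
      ring
    · simp only [pvLoopA, pvLeadO, pvAfterO, h, if_false]
      rw [ih 0 r, show pvTriC c 0 = 0 from rfl]
      have hb : pvGoB (x :: t) = pvGoB t := by simp [pvGoB, h]
      rw [hb, pvGoB_lead t]
      ring

-- ===== VERDICT (by name: the statement is the Claim_ definition above) =====
theorem countfunc_spec : Claim_equal_countfunc := by
  intro s _
  show countfunc s = countfunc_alt s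
  unfold countfunc countfunc_alt
  rw [pvLoopA_eq, pvGoB_lead s.toList]
  ring
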